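-- pv_equiv track=rewrite | github.com/BrendanCReidy/ApproximateMultiplyQuantizedNeuralNetworks | ApproximateNeuralNetwork.py | multiplixing
-- ===== SOURCE A (Python) =====
-- def multiplixing(var,log_val,mult_wd):
--     masking_var = 0
--     if (log_val > (mult_wd -1)):
--         for n in range (log_val, log_val - mult_wd,-1):
--             masking_var = pow(2,n) + masking_var
--         var = var & masking_var
--         return var
--     else:
--         return var
-- ===== SOURCE B (Python) =====
-- def multiplixing(var, log_val, mult_wd):
--     if log_val > mult_wd - 1:
--         mask = ((1 << max(mult_wd, 0)) - 1) << (log_val - mult_wd + 1)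
--         return var & mask
--     return var
-- ===== Notes on version B (the rewrite author's own statement) =====
-- stated objective: simpler
-- what changed: replaces the loop that sums mult_wd powers of two with a single closed-form bitmask ((1<<max(mult_wd,0))-1)<<(log_val-mult_wd+1) applied in one AND
import Mathlib
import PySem

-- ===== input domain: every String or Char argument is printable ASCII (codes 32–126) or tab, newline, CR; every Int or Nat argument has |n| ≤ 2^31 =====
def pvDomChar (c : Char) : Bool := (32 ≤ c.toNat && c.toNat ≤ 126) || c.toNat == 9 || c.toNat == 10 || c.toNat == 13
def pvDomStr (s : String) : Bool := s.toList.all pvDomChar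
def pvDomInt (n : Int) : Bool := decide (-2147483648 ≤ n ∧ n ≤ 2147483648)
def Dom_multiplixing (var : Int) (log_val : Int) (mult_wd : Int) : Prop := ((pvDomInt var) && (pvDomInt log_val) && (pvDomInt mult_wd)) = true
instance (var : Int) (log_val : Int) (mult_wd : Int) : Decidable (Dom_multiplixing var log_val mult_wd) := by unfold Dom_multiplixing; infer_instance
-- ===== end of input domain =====

-- B replaces A's loop summing powers of two with one closed-form shifted bitmask (simpler).


-- ===== PORT A =====
-- pow(2, n) is ported as 2 ^ n.toNat: exact here, since whenever the loop body runs
-- we have log_val > mult_wd - 1 and a nonempty range, so every n in the range is ≥ 1.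
def multiplixing (var : Int) (log_val : Int) (mult_wd : Int) : Int :=
  if log_val > mult_wd - 1 then
    let masking_var :=
      (PySem.List.pyRange log_val (log_val - mult_wd) (-1)).foldl
        (fun m n => 2 ^ n.toNat + m) 0
    PySem.Int.band var masking_var
  else var

-- ===== PORT B =====
def multiplixing_alt (var : Int) (log_val : Int) (mult_wd : Int) : Int :=
  if log_val > mult_wd - 1 then
    let mask := (((1 : Int) <<< (max mult_wd 0).toNat) - 1) <<< (log_val - mult_wd + 1).toNat
    PySem.Int.band var mask
  else var

-- ===== PRECONDITION & SPEC =====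
def Spec_multiplixing (var : Int) (log_val : Int) (mult_wd : Int) (out : Int) : Prop := out = multiplixing_alt var log_val mult_wd
instance (var : Int) (log_val : Int) (mult_wd : Int) (out : Int) : Decidable (Spec_multiplixing var log_val mult_wd out) := by unfold Spec_multiplixing; infer_instance

-- ===== CLAIM (what is proved, stated in full; the proofs are below) =====
def Claim_equal_multiplixing : Prop := ∀ (var : Int) (log_val : Int) (mult_wd : Int), Dom_multiplixing var log_val mult_wd → Spec_multiplixing var log_val mult_wd (multiplixing var log_val mult_wd)

-- ===== LEMMAS AND PROOFS =====

-- Sum of the k powers 2^a + 2^(a-1) + … + 2^(a-k+1), folded the way A's loop does, in closed form.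
lemma mask_sum (a : Int) (k : Nat) (h : (k : Int) ≤ a + 1) :
    (List.map (fun i : Nat => a - (i : Int)) (List.range k)).foldl (fun m n => 2 ^ n.toNat + m) (0 : Int)
      = 2 ^ (a + 1).toNat - 2 ^ (a + 1 - k).toNat := by
  induction k with
  | zero => simp
  | succ k ih =>
    rw [List.range_succ]
    simp only [List.map_append, List.foldl_append]
    rw [ih (by push_cast at h ⊢; omega)]
    simp only [List.map_cons, List.map_nil, List.foldl_cons, List.foldl_nil]
    have h1 : (a + 1 - (k : Int)).toNat = (a - (k : Int)).toNat + 1 := by push_cast at h; omega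
    have h2 : (a + 1 - ((k : Nat) + 1 : Nat)).toNat = (a - (k : Int)).toNat := by push_cast at h ⊢; omega
    rw [h1, h2, pow_succ]
    ring

lemma masks_eq (log_val mult_wd : Int) (h : log_val > mult_wd - 1) :
    (PySem.List.pyRange log_val (log_val - mult_wd) (-1)).foldl (fun m n => 2 ^ n.toNat + m) 0
      = (((1 : Int) <<< (max mult_wd 0).toNat) - 1) <<< (log_val - mult_wd + 1).toNat := by
  rw [PySem.List.pyRange_neg_one, Int.shiftLeft_eq, Int.shiftLeft_eq, one_mul]
  by_cases hm : mult_wd ≤ 0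
  · have h0 : (log_val - (log_val - mult_wd)).toNat = 0 := by omega
    have hw : (max mult_wd 0).toNat = 0 := by omega
    have hz : mult_wd.toNat = 0 := by omega
    simp [hz, hw]
  · push Not at hm
    have hk : (log_val - (log_val - mult_wd)).toNat = mult_wd.toNat := by omega
    rw [hk]
    refine Eq.trans (mask_sum log_val mult_wd.toNat (by omega)) ?_
    have hw : (max mult_wd 0).toNat = mult_wd.toNat := by omega
    have hsum : mult_wd.toNat + (log_val - mult_wd + 1).toNat = (log_val + 1).toNat := by omega
    have h2 : (log_val + 1 - (mult_wd.toNat : Int)).toNat = (log_val - mult_wd + 1).toNat := by omega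
    rw [hw, h2, sub_mul, one_mul, ← pow_add, hsum]

-- ===== VERDICT (by name: the statement is the Claim_ definition above) =====
theorem multiplixing_spec : Claim_equal_multiplixing := by
  intro var log_val mult_wd _
  unfold Spec_multiplixing multiplixing multiplixing_alt
  by_cases h : log_val > mult_wd - 1
  · simp only [h, if_pos]
    rw [masks_eq log_val mult_wd h]
  · simp [h]
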